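-- pv_equiv track=rewrite | github.com/nyagami/Python-PTIT | PY01027 - SỐ LỘC PHÁT ĐẸP.py | check
-- ===== SOURCE A (Python) =====
-- def check(s):
--     hit = 0
--     for i in s:
--         if i!='6' and i!='8': return 'NO'
--         if i=='8': hit+=1
--         else: hit=0
--         if hit==3: return 'NO'
--     return 'YES'
-- ===== SOURCE B (Python) =====
-- def check(s):
--     return 'YES' if set(s) <= {'6', '8'} and '888' not in s else 'NO'
-- ===== Notes on version B (the rewrite author's own statement) =====
-- stated objective: idiomatic
-- what changed: Replaces the stateful per-character counter loop with a single boolean expression: a set-subset alphabet check plus a substring test for a run of three eights.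
import Mathlib
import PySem

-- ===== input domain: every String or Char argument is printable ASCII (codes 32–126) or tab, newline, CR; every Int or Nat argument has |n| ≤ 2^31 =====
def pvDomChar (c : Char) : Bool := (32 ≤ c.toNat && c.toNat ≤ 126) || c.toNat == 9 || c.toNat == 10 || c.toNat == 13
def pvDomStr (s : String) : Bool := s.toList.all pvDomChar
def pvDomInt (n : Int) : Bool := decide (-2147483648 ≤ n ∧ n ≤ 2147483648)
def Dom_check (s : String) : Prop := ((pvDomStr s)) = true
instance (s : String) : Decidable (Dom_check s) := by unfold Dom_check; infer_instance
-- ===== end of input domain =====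

-- B replaces A's stateful counter loop with one boolean expression: a set-subset alphabet check and a '888' substring test (idiomatic; same cost).

-- ===== PORT A =====
def checkLoop : List Char → Int → String
  | [], _ => "YES"
  | c :: rest, hit =>
    if c != '6' && c != '8' then "NO"
    else
      let hit' : Int := if c == '8' then hit + 1 else 0
      if hit' == 3 then "NO" else checkLoop rest hit'

def check (s : String) : String := checkLoop s.toList 0

-- ===== PORT B =====
def check_alt (s : String) : String :=
  if PySem.Set.issubset (PySem.Set.ofList s.toList) (PySem.Set.ofList ['6', '8'])
      && !(PySem.Str.isIn "888" s) then "YES" else "NO"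

-- ===== PRECONDITION & SPEC =====
def Spec_check (s : String) (out : String) : Prop := out = check_alt s
instance (s : String) (out : String) : Decidable (Spec_check s out) := by unfold Spec_check; infer_instance

-- ===== CLAIM (what is proved, stated in full; the proofs are below) =====
def Claim_equal_check : Prop := ∀ (s : String), Dom_check s → Spec_check s (check s)

-- ===== LEMMAS AND PROOFS =====

theorem isIn_skip6 (rest : List Char) : ∀ n, n < 3 →
    PySem.Chars.isIn ['8','8','8'] (List.replicate n '8' ++ ('6' :: rest)) =
      PySem.Chars.isIn ['8','8','8'] rest := by
  intro n hn
  rw [Bool.eq_iff_iff, PySem.Chars.isIn_iff_infix, PySem.Chars.isIn_iff_infix]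
  interval_cases n <;>
    simp [List.infix_cons_iff, List.cons_prefix_cons, show ('8' : Char) ≠ '6' from by decide]

theorem checkLoop_eq (l : List Char) : ∀ (n : Nat), n < 3 →
    checkLoop l (n : Int) =
      if l.all (fun c => c == '6' || c == '8')
          && !(PySem.Chars.isIn ['8','8','8'] (List.replicate n '8' ++ l))
        then "YES" else "NO" := by
  induction l with
  | nil =>
    intro n hn
    interval_cases n <;> decide
  | cons c rest ih =>
    intro n hn
    by_cases h6 : c = '6'
    · subst h6
      rw [isIn_skip6 rest n hn]
      have := ih 0 (by norm_num)
      simpa [checkLoop] using this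
    · by_cases h8 : c = '8'
      · subst h8
        by_cases h2 : n = 2
        · subst h2
          have hI : PySem.Chars.isIn ['8','8','8'] (List.replicate 2 '8' ++ '8' :: rest) = true := by
            rw [PySem.Chars.isIn_iff_infix]
            exact (show (['8','8','8'] : List Char) <+: '8'::'8'::'8'::rest by
              simp [List.cons_prefix_cons]).isInfix
          simp only [checkLoop]
          norm_num
          intro _
          simpa using hI
        · have hn' : n + 1 < 3 := by omega
          have hrep : List.replicate n '8' ++ ('8' :: rest) = List.replicate (n+1) '8' ++ rest := by
            rw [List.replicate_succ']
            simp
          have hne : ((n : Int) + 1) ≠ 3 := by omega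
          have := ih (n+1) hn'
          push_cast at this
          rw [hrep]
          simpa [checkLoop, hne] using this
      · simp [checkLoop, h6, h8]

theorem check_spec_aux (s : String) : check s = check_alt s := by
  have h := checkLoop_eq s.toList 0 (by norm_num)
  simp only [List.replicate, List.nil_append, Nat.cast_zero] at h
  rw [check, h, check_alt]
  have hsub : PySem.Set.issubset (PySem.Set.ofList s.toList) (PySem.Set.ofList ['6','8'])
      = s.toList.all (fun c => c == '6' || c == '8') := by
    rw [Bool.eq_iff_iff, PySem.Set.issubset_iff, List.all_eq_true]
    simp [PySem.Set.mem_ofList]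
  have hin : PySem.Str.isIn "888" s = PySem.Chars.isIn ['8','8','8'] s.toList := by
    simp [PySem.Str.isIn]
  rw [hsub, hin]
  rfl

-- ===== VERDICT (by name: the statement is the Claim_ definition above) =====
theorem check_spec : Claim_equal_check := by
  intro s _
  exact check_spec_aux s
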